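-- pv_equiv track=rewrite | github.com/pypi-data/pypi-mirror-276 | packages/CI-CloudConnector/CI_CloudConnector-2.0-py3-none-any.whl/logic.py | arrange_tags_by_plc
-- ===== SOURCE A (Python) =====
-- def arrange_tags_by_plc(tags_definitions):
--
--     arranged_tags = {}
--
--     for tag_def in tags_definitions:
--         plc_address = tag_def.get("PlcIpAddress")
--         if plc_address:
--             if plc_address not in arranged_tags:
--                 arranged_tags[plc_address] = []
--             arranged_tags[plc_address].append(tag_def)
--
--     return arranged_tags
-- ===== SOURCE B (Python) =====
-- def arrange_tags_by_plc(tags_definitions):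
--     # Two-phase: collect the distinct truthy addresses in first-appearance order,
--     # then build each group with one filter pass over the input.
--     addrs = []
--     for tag_def in tags_definitions:
--         a = tag_def.get("PlcIpAddress")
--         if a and a not in addrs:
--             addrs.append(a)
--     return {a: [td for td in tags_definitions
--                 if td.get("PlcIpAddress") == a]
--             for a in addrs}
-- ===== Notes on version B (the rewrite author's own statement) =====
-- stated objective: alternative
-- what changed: Replaces A's single-pass incremental dict insertion with a two-phase strategy: first collect the distinct truthy addresses in first-appearance order, then build the whole result with a dict comprehension that filters the input once per address.
import Mathlib
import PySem

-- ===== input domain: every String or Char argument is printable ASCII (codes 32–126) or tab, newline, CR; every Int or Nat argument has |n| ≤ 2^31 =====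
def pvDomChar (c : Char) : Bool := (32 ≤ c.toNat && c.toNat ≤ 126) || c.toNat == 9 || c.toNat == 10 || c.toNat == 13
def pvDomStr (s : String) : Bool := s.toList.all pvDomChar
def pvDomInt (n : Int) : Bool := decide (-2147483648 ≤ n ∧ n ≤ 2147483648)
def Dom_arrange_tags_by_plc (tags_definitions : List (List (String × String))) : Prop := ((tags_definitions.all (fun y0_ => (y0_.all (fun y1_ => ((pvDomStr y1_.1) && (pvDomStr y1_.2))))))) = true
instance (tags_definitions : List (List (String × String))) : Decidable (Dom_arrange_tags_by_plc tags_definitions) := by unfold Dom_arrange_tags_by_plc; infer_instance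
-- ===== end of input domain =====

-- B replaces A's single-pass incremental dict building by a two-phase strategy
-- (collect distinct truthy addresses, then one filter pass per address); alternative, not faster.


-- tag_def.get("PlcIpAddress") — first-match lookup in the tag's association list
def pvGetAddr (td : List (String × String)) : Option String :=
  (PySem.Dict.mk td).get? "PlcIpAddress"

-- ===== PORT A =====
def arrange_tags_by_plc (tags_definitions : List (List (String × String))) : List (String × List (List (String × String))) :=
  (tags_definitions.foldl
    (fun arranged_tags tag_def =>
      match pvGetAddr tag_def with
      | some plc_address =>
          if plc_address ≠ "" then          -- `if plc_address:` (truthy)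
            let d1 := if arranged_tags.contains plc_address then arranged_tags
                      else arranged_tags.insert plc_address ([] : List (List (String × String)))
            d1.modify plc_address [] (fun l => l ++ [tag_def])   -- arranged_tags[plc].append(tag_def)
          else arranged_tags
      | none => arranged_tags)
    PySem.Dict.empty).items

-- ===== PORT B =====
def arrange_tags_by_plc_alt (tags_definitions : List (List (String × String))) : List (String × List (List (String × String))) :=
  let addrs : List String := tags_definitions.foldl
    (fun addrs tag_def =>
      match pvGetAddr tag_def with
      | some a => if a ≠ "" ∧ a ∉ addrs then addrs ++ [a] else addrs
      | none => addrs)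
    []
  addrs.map (fun a => (a, tags_definitions.filter (fun td => pvGetAddr td == some a)))

-- ===== PRECONDITION & SPEC =====
def Spec_arrange_tags_by_plc (tags_definitions : List (List (String × String))) (out : List (String × List (List (String × String)))) : Prop := out = arrange_tags_by_plc_alt tags_definitions
instance (tags_definitions : List (List (String × String))) (out : List (String × List (List (String × String)))) : Decidable (Spec_arrange_tags_by_plc tags_definitions out) := by unfold Spec_arrange_tags_by_plc; infer_instance

-- ===== CLAIM (what is proved, stated in full; the proofs are below) =====
def Claim_equal_arrange_tags_by_plc : Prop := ∀ (tags_definitions : List (List (String × String))), Dom_arrange_tags_by_plc tags_definitions → Spec_arrange_tags_by_plc tags_definitions (arrange_tags_by_plc tags_definitions)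

-- ===== LEMMAS AND PROOFS =====

-- the (address, tag) pairs A actually processes, in order
def pvPairs (tags : List (List (String × String))) : List (String × List (String × String)) :=
  tags.filterMap (fun td =>
    match pvGetAddr td with
    | some a => if a ≠ "" then some (a, td) else none
    | none => none)

-- A's conditional insert-then-append collapses to one `modify`
theorem pvStepA_eq_modify (d : PySem.Dict String (List (List (String × String))))
    (k : String) (td : List (String × String)) :
    (if d.contains k then d else d.insert k ([] : List (List (String × String)))).modify k []
        (fun l => l ++ [td])
      = d.modify k [] (fun l => l ++ [td]) := by
  by_cases h : d.contains k
  · simp [h]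
  · have hc : d.contains k = false := by simpa using h
    have hg : d.getD k ([] : List (List (String × String))) = [] := by
      simp [PySem.Dict.getD_of_not_contains, hc]
    simp [h, PySem.Dict.modify, PySem.Dict.getD_insert_self, PySem.Dict.insert_insert_self, hg]

-- A's loop is the plain grouping loop over pvPairs
theorem pvFoldA_eq (tags : List (List (String × String)))
    (d : PySem.Dict String (List (List (String × String)))) :
    tags.foldl
      (fun arranged_tags tag_def =>
        match pvGetAddr tag_def with
        | some plc_address =>
            if plc_address ≠ "" then
              let d1 := if arranged_tags.contains plc_address then arranged_tags
                        else arranged_tags.insert plc_address ([] : List (List (String × String)))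
              d1.modify plc_address [] (fun l => l ++ [tag_def])
            else arranged_tags
        | none => arranged_tags) d
    = (pvPairs tags).foldl (fun d p => d.modify p.1 [] (· ++ [p.2])) d := by
  induction tags generalizing d with
  | nil => rfl
  | cons td rest ih =>
      simp only [pvPairs, List.filterMap_cons, List.foldl_cons]
      cases h : pvGetAddr td with
      | none => simpa [pvPairs] using ih d
      | some a =>
          by_cases ha : a = ""
          · simpa [ha, pvPairs] using ih d
          · simpa [ha, pvPairs, pvStepA_eq_modify] using
              ih (d.modify a [] (fun l => l ++ [td]))

-- B's address loop is the Set.add loop over pvPairs' keys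
theorem pvFoldK_eq (tags : List (List (String × String))) (acc : List String) :
    tags.foldl
      (fun addrs tag_def =>
        match pvGetAddr tag_def with
        | some a => if a ≠ "" ∧ a ∉ addrs then addrs ++ [a] else addrs
        | none => addrs) acc
    = (pvPairs tags).foldl (fun s p => PySem.Set.add s p.1) acc := by
  induction tags generalizing acc with
  | nil => rfl
  | cons td rest ih =>
      simp only [pvPairs, List.filterMap_cons, List.foldl_cons]
      cases h : pvGetAddr td with
      | none => simpa [pvPairs] using ih acc
      | some a =>
          by_cases ha : a = ""
          · simpa [ha, pvPairs] using ih acc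
          · by_cases hm : a ∈ acc
            · simpa [ha, hm, pvPairs, PySem.Set.add_of_mem hm] using ih acc
            · simpa [ha, hm, pvPairs, PySem.Set.add_of_not_mem hm] using ih (acc ++ [a])

-- filtering pvPairs at a truthy address a is filtering tags at a
theorem pvFilter_eq (tags : List (List (String × String))) (a : String) (ha : a ≠ "") :
    ((pvPairs tags).filter (fun p => p.1 == a)).map (·.2)
      = tags.filter (fun td => pvGetAddr td == some a) := by
  induction tags with
  | nil => rfl
  | cons td rest ih =>
      simp only [pvPairs, List.filterMap_cons] at ih ⊢
      cases h : pvGetAddr td with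
      | none => simpa [h, List.filter_cons] using ih
      | some b =>
          by_cases hba : b = a
          · subst hba
            simpa [h, ha, List.filter_cons] using ih
          · by_cases hb0 : b = ""
            · have h2 : ((some b : Option String) == some a) = false := by
                simp [hba]
              simpa [h, hb0, h2, ha, Ne.symm ha, List.filter_cons] using ih
            · have h1 : (b == a) = false := by simpa using hba
              have h2 : ((some b : Option String) == some a) = false := by
                simp [hba]
              simpa [h, hb0, h1, h2, List.filter_cons] using ih

-- every key of pvPairs is truthy
theorem pvPairs_key_ne (tags : List (List (String × String)))
    {a : String} (h : a ∈ (pvPairs tags).map (·.1)) : a ≠ "" := by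
  rcases List.mem_map.mp h with ⟨p, hp, rfl⟩
  rcases List.mem_filterMap.mp hp with ⟨td, _, htd⟩
  cases hg : pvGetAddr td with
  | none => rw [hg] at htd; simp at htd
  | some b =>
      rw [hg] at htd
      by_cases hb : b = ""
      · simp [hb] at htd
      · simp [hb] at htd
        subst htd
        simpa using hb

-- B's address loop result as a Set.update (first-occurrence dedup of the keys)
theorem pvFoldAdd (L : List (String × List (String × String))) (s : List String) :
    L.foldl (fun s p => PySem.Set.add s p.1) s
      = PySem.Set.update s (L.map (·.1)) := by
  induction L generalizing s with
  | nil => rfl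
  | cons p rest ih => simp [PySem.Set.update_cons, ih]

-- ===== VERDICT (by name: the statement is the Claim_ definition above) =====
theorem arrange_tags_by_plc_spec : Claim_equal_arrange_tags_by_plc := by
  intro tags _
  unfold Spec_arrange_tags_by_plc arrange_tags_by_plc arrange_tags_by_plc_alt
  rw [pvFoldA_eq, pvFoldK_eq, pvFoldAdd]
  set L := pvPairs tags with hL
  set d := L.foldl (fun d p => d.modify p.1 [] (· ++ [p.2])) PySem.Dict.empty with hd
  have hkeys : d.keys = PySem.Set.update ([] : List String) (L.map (·.1)) := by
    rw [hd]
    rw [PySem.Dict.keys_foldl_modify_key]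
    simp [PySem.Dict.keys_empty]
  have hnd : d.keys.Nodup := by
    rw [hkeys]
    exact PySem.Set.nodup_update _ _ List.nodup_nil
  rw [PySem.Dict.items_eq_map_keys d hnd ([] : List (List (String × String)))]
  rw [hkeys]
  apply List.map_congr_left
  intro a hmem
  have haL : a ∈ L.map (·.1) := by
    rcases (PySem.Set.mem_update _ _ _).mp hmem with h | h
    · simp at h
    · exact h
  have ha : a ≠ "" := pvPairs_key_ne tags (hL ▸ haL)
  congr 1
  rw [hd, PySem.Dict.getD_foldl_modify_append]
  simpa [PySem.Dict.getD_empty] using pvFilter_eq tags a ha
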